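-- pv_equiv track=rewrite | github.com/y2sec/Algorithm | Programmers/49.py | solution
-- ===== SOURCE A (Python) =====
-- def solution(m, musicinfos):
--     answer = '(None)'
--     maxTime = 0
--
--     findmusic = []
--     for idx in range(len(m)):
--         if m[idx] == '#':
--             findmusic[-1] += '#'
--             continue
--         findmusic.append(m[idx])
--
--     m = ' '.join(findmusic) + ' '
--
--     for musicinfo in musicinfos:
--         musicinfo = musicinfo.split(',')
--         melody = []
--         for idx in range(len(musicinfo[3])):
--             if musicinfo[3][idx] == '#':
--                 melody[-1] += '#'
--                 continue
--             melody.append(musicinfo[3][idx])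
--
--         hour = int(musicinfo[1][:2]) - int(musicinfo[0][:2])
--         minute = int(musicinfo[1][3:]) - int(musicinfo[0][3:])
--
--         time = (hour * 60) + minute
--         music = ''
--         for idx in range(time):
--             music += melody[idx % len(melody)] + ' '
--
--         if m in music and time > maxTime:
--             maxTime = time
--             answer = musicinfo[2]
--
--     return answer
-- ===== SOURCE B (Python) =====
-- def solution(m, musicinfos):
--     # Insert a space after every char that ends a note token (next char is not '#').
--     def spaced(s):
--         out = []
--         for i in range(len(s)):
--             out.append(s[i])
--             if i + 1 == len(s) or s[i + 1] != '#':
--                 out.append(' ')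
--         return ''.join(out)
--
--     q = spaced(m) if m else ' '
--     best_time = 0
--     answer = '(None)'
--     for info in musicinfos:
--         parts = info.split(',')
--         time = (int(parts[1][:2]) - int(parts[0][:2])) * 60 \
--              + (int(parts[1][3:]) - int(parts[0][3:]))
--         mel = parts[3]
--         n = sum(ch != '#' for ch in mel)   # number of notes in one cycle
--         if time <= 0 or n == 0:
--             continue
--         k, r = time // n, time % n
--         C = spaced(mel)                     # one full played cycle
--         # chars consumed by the first r notes of the cycle (in C, spaces included)
--         pr = len(mel) + r
--         cnt = 0
--         for j in range(len(mel)):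
--             if mel[j] != '#':
--                 if cnt == r:
--                     pr = j + r
--                     break
--                 cnt += 1
--         M = k * len(C) + pr                 # total length of the played string
--         # The played string is a prefix of the periodic stream C*C*C*...; any
--         # occurrence of q can be shifted to start before |C|, so a window of
--         # length min(M, |C| + |q| - 1) suffices.
--         Ls = min(M, len(C) + len(q) - 1)
--         reps = -(-Ls // len(C))
--         small = (C * reps)[:Ls]
--         if q in small and time > best_time:
--             best_time = time
--             answer = parts[2]
--     return answer
-- ===== Notes on version B (the rewrite author's own statement) =====
-- stated objective: faster
-- what changed: B never tokenizes the melody nor builds the minute-by-minute played string: a single char-level pass inserts the note-separating spaces to get one cycle C, the played string's length is computed arithmetically, and by periodicity the substring test is done on a window of length min(M, |C|+|q|-1) instead of A's O(time)-length string.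
import Mathlib
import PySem

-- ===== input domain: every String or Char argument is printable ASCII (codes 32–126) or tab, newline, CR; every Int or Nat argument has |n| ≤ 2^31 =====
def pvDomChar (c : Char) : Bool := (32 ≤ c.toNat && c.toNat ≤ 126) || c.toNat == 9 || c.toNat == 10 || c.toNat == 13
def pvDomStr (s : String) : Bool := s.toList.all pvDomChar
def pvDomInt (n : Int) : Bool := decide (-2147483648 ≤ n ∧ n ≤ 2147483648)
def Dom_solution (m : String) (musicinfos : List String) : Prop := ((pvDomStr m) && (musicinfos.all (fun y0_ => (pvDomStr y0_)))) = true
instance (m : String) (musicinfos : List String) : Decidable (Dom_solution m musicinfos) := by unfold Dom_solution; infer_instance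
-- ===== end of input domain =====

-- B avoids tokenizing the melody and building the minute-by-minute played string: one char pass
-- builds a single spaced cycle, the played length is computed arithmetically, and by periodicity
-- the substring test runs on a window of length min(M, |C|+|q|-1) (objective: faster).

-- ===== PORT A =====
-- A's note parse: append a new 1-char token, or add '#' to the last token ('findmusic[-1] += "#"').
def pvParseA (cs : List Char) : List (List Char) :=
  cs.foldl (fun acc c =>
    if c = '#' then acc.dropLast ++ [acc.getLastD [] ++ ['#']]
    else acc ++ [[c]]) []

-- One iteration of A's loop over musicinfos, state = (answer, maxTime).
-- Out-of-range parts / failed int() — where Python A raises — are given junk defaults; Pre_ excludes them.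
def pvStepA (q : List Char) (st : String × Int) (info : List Char) : String × Int :=
  let parts := PySem.Chars.splitOn info [',']
  let melody := pvParseA (parts.getD 3 [])
  let hour := (PySem.Int.ofChars? (PySem.List.slice (parts.getD 1 []) none (some 2))).getD 0
            - (PySem.Int.ofChars? (PySem.List.slice (parts.getD 0 []) none (some 2))).getD 0
  let minute := (PySem.Int.ofChars? (PySem.List.slice (parts.getD 1 []) (some 3) none)).getD 0
              - (PySem.Int.ofChars? (PySem.List.slice (parts.getD 0 []) (some 3) none)).getD 0
  let time := hour * 60 + minute
  let music := (PySem.List.pyRange 0 time 1).foldl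
    (fun acc i => acc ++ ((PySem.List.pyGet? melody (PySem.Int.mod i melody.length)).getD [] ++ [' '])) []
  if PySem.Chars.isIn q music && decide (st.2 < time) then (String.ofList (parts.getD 2 []), time) else st

def solution (m : String) (musicinfos : List String) : String :=
  let findmusic := pvParseA m.toList
  let q := PySem.Chars.join [' '] findmusic ++ [' ']
  (musicinfos.foldl (fun st info => pvStepA q st info.toList) ("(None)", 0)).1

-- ===== PORT B =====
-- B's spacing pass: emit each char, and a ' ' after every char not followed by '#'.
def pvSpaced : List Char → List Char
  | [] => []
  | c :: rest => if rest.head? = some '#' then c :: pvSpaced rest else c :: ' ' :: pvSpaced rest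

-- B's pr loop: chars (spaces included) covered by the first r notes of the spaced cycle;
-- transliterates the 'for j in range(len(mel))' scan with its break and default.
def pvPrLoop : List Char → Int → Int → Int → Int → Int
  | [], _, _, _, dflt => dflt
  | ch :: rest, j, cnt, r, dflt =>
    if ch ≠ '#' then
      (if cnt = r then j + r else pvPrLoop rest (j + 1) (cnt + 1) r dflt)
    else pvPrLoop rest (j + 1) cnt r dflt

-- One iteration of B's loop, state = (answer, best_time).
def pvStepB (q : List Char) (st : String × Int) (info : List Char) : String × Int :=
  let parts := PySem.Chars.splitOn info [',']
  let time := ((PySem.Int.ofChars? (PySem.List.slice (parts.getD 1 []) none (some 2))).getD 0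
             - (PySem.Int.ofChars? (PySem.List.slice (parts.getD 0 []) none (some 2))).getD 0) * 60
            + ((PySem.Int.ofChars? (PySem.List.slice (parts.getD 1 []) (some 3) none)).getD 0
             - (PySem.Int.ofChars? (PySem.List.slice (parts.getD 0 []) (some 3) none)).getD 0)
  let mel := parts.getD 3 []
  let n : Int := (mel.countP (fun ch => ch ≠ '#') : Int)
  if time ≤ 0 ∨ n = 0 then st
  else
    let k := PySem.Int.floordiv time n
    let r := PySem.Int.mod time n
    let C := pvSpaced mel
    let pr := pvPrLoop mel 0 0 r ((mel.length : Int) + r)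
    let M := k * (C.length : Int) + pr
    let Ls := min M ((C.length : Int) + (q.length : Int) - 1)
    let reps := -(PySem.Int.floordiv (-Ls) (C.length : Int))
    let small := PySem.List.slice (PySem.List.pyRepeat C reps) none (some Ls)
    if PySem.Chars.isIn q small && decide (st.2 < time) then (String.ofList (parts.getD 2 []), time) else st

def solution_alt (m : String) (musicinfos : List String) : String :=
  let q := if m.toList ≠ [] then pvSpaced m.toList else [' ']
  (musicinfos.foldl (fun st info => pvStepB q st info.toList) ("(None)", 0)).1

-- ===== PRECONDITION & SPEC =====
-- Pre_ excludes exactly the inputs where Python A raises: a melody string (m or field 3) starting with '#'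
-- (IndexError on findmusic[-1]), fewer than 4 comma-fields (IndexError), a time field int() cannot parse
-- (ValueError), and an empty melody with positive duration (ZeroDivisionError).
def Pre_solution (m : String) (musicinfos : List String) : Prop :=
  m.toList.head? ≠ some '#' ∧
  ∀ info ∈ musicinfos,
    4 ≤ (PySem.Chars.splitOn info.toList [',']).length ∧
    (PySem.Int.ofChars? (PySem.List.slice ((PySem.Chars.splitOn info.toList [',']).getD 0 []) none (some 2))).isSome = true ∧
    (PySem.Int.ofChars? (PySem.List.slice ((PySem.Chars.splitOn info.toList [',']).getD 1 []) none (some 2))).isSome = true ∧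
    (PySem.Int.ofChars? (PySem.List.slice ((PySem.Chars.splitOn info.toList [',']).getD 0 []) (some 3) none)).isSome = true ∧
    (PySem.Int.ofChars? (PySem.List.slice ((PySem.Chars.splitOn info.toList [',']).getD 1 []) (some 3) none)).isSome = true ∧
    ((PySem.Chars.splitOn info.toList [',']).getD 3 []).head? ≠ some '#' ∧
    ((PySem.Chars.splitOn info.toList [',']).getD 3 [] = [] →
      ((PySem.Int.ofChars? (PySem.List.slice ((PySem.Chars.splitOn info.toList [',']).getD 1 []) none (some 2))).getD 0
       - (PySem.Int.ofChars? (PySem.List.slice ((PySem.Chars.splitOn info.toList [',']).getD 0 []) none (some 2))).getD 0) * 60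
      + ((PySem.Int.ofChars? (PySem.List.slice ((PySem.Chars.splitOn info.toList [',']).getD 1 []) (some 3) none)).getD 0
       - (PySem.Int.ofChars? (PySem.List.slice ((PySem.Chars.splitOn info.toList [',']).getD 0 []) (some 3) none)).getD 0) ≤ 0)
instance (m : String) (musicinfos : List String) : Decidable (Pre_solution m musicinfos) := by
  unfold Pre_solution; infer_instance

def pvWitness_solution : String × List String := ("ABC#A", ["10:00,10:07,WORLD,CC#ABC#A", "12:00,12:03,HELLO,AB"])

def Spec_solution (m : String) (musicinfos : List String) (out : String) : Prop := out = solution_alt m musicinfos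
instance (m : String) (musicinfos : List String) (out : String) : Decidable (Spec_solution m musicinfos out) := by unfold Spec_solution; infer_instance

-- ===== CLAIM (what is proved, stated in full; the proofs are below) =====
def Claim_equal_solution : Prop := ∀ (m : String) (musicinfos : List String), Dom_solution m musicinfos → Pre_solution m musicinfos → Spec_solution m musicinfos (solution m musicinfos)

-- ===== LEMMAS AND PROOFS =====

-- Proof-only tokenizer: the common token structure both programs realize.
def pvTokB : List Char → List (List Char)
  | [] => []
  | c :: rest => (c :: rest.takeWhile (· = '#')) :: pvTokB (rest.dropWhile (· = '#'))
termination_by cs => cs.length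
decreasing_by
  simp only [List.length_cons]
  exact Nat.lt_succ_of_le (List.length_dropWhile_le _ _)

-- shorthand for repeated cycles (proof-only)
def pvRep (N : Nat) (C : List Char) : List Char := (List.replicate N C).flatten

theorem pvRep_len (N : Nat) (C : List Char) : (pvRep N C).length = N * C.length := by
  simp [pvRep]

theorem pvRep_add (a b : Nat) (C : List Char) : pvRep (a + b) C = pvRep a C ++ pvRep b C := by
  unfold pvRep
  rw [List.replicate_add, List.flatten_append]

theorem pvRep_succ (N : Nat) (C : List Char) : pvRep (N + 1) C = C ++ pvRep N C := by
  simp [pvRep, List.replicate_succ]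

theorem pvRep_succ' (N : Nat) (C : List Char) : pvRep (N + 1) C = pvRep N C ++ C := by
  simp [pvRep, List.replicate_succ']

theorem pv_infix_exists_drop (q l : List Char) (h : q <:+: l) : ∃ i, q <+: l.drop i := by
  obtain ⟨t, hp, hs⟩ := List.infix_iff_prefix_suffix.mp h
  obtain ⟨pre, hpre⟩ := hs
  exact ⟨pre.length, by rw [← hpre, List.drop_left]; exact hp⟩

theorem pv_prefix_drop_infix (q l : List Char) (i : Nat) (hp : q <+: l.drop i) : q <:+: l :=
  hp.isInfix.trans (List.drop_suffix i l).isInfix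

theorem pv_drop_ge (l1 l2 : List Char) (n : Nat) (h : l1.length ≤ n) :
    (l1 ++ l2).drop n = l2.drop (n - l1.length) := by
  rw [show n = l1.length + (n - l1.length) by omega, List.drop_length_add_append]
  congr 1
  omega

-- shift an occurrence in the periodic stream one cycle to the left
theorem pv_shift (C q : List Char) (N i : Nat) (hi : C.length ≤ i)
    (hbound : i + q.length ≤ N * C.length) (hp : q <+: (pvRep N C).drop i) :
    q <+: (pvRep N C).drop (i - C.length) := by
  by_cases hC0 : C.length = 0
  · simpa [hC0] using hp
  · have hN : 1 ≤ N := by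
      by_contra hN0
      have : N = 0 := by omega
      subst this
      simp at hbound
      omega
    obtain ⟨N', rfl⟩ : ∃ N', N = N' + 1 := ⟨N - 1, by omega⟩
    have hiP : i - C.length ≤ N' * C.length := by
      have : i + q.length ≤ (N' + 1) * C.length := hbound
      have : i ≤ N' * C.length + C.length := by nlinarith
      omega
    have hdrop : (pvRep (N' + 1) C).drop i = (pvRep N' C).drop (i - C.length) := by
      rw [pvRep_succ, pv_drop_ge C (pvRep N' C) i hi]
    rw [hdrop] at hp
    rw [pvRep_succ', List.drop_append_of_le_length (by rw [pvRep_len]; exact hiP)]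
    exact hp.trans (List.prefix_append _ _)

-- an occurrence anywhere in the first M chars gives one in the first Ls = min M (|C|+|q|-1) chars
theorem pv_window (C q : List Char) (hq : q ≠ []) (N M Ls : Nat)
    (hM : M ≤ N * C.length) (hLs : Ls = min M (C.length + q.length - 1)) :
    (q <:+: (pvRep N C).take M) ↔ (q <:+: (pvRep N C).take Ls) := by
  have hq1 : 1 ≤ q.length := List.length_pos_iff.mpr hq
  constructor
  · intro h
    obtain ⟨i0, hp0⟩ := pv_infix_exists_drop q _ h
    rw [List.drop_take] at hp0
    obtain ⟨hpS, hlen⟩ := List.prefix_take_iff.mp hp0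
    have hi0 : i0 + q.length ≤ M := by omega
    clear hp0 hlen h
    induction i0 using Nat.strong_induction_on with
    | _ i ih =>
      by_cases hend : i + q.length ≤ Ls
      · have : q <+: ((pvRep N C).take Ls).drop i := by
          rw [List.drop_take]
          exact List.prefix_take_iff.mpr ⟨hpS, by omega⟩
        exact pv_prefix_drop_infix q _ i this
      · have hCpos : 0 < C.length := by
          by_contra hc
          have : C.length = 0 := by omega
          rw [this] at hM
          omega
        have hLs' : Ls = C.length + q.length - 1 := by omega
        have hi : C.length ≤ i := by omega
        exact ih (i - C.length) (by omega)
          (pv_shift C q N i hi (by omega) hpS) (by omega)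
  · intro h
    have hLsM : Ls ≤ M := by omega
    have : (pvRep N C).take Ls = ((pvRep N C).take M).take Ls := by
      rw [List.take_take, min_eq_left hLsM]
    rw [this] at h
    exact h.trans (List.take_prefix _ _).isInfix

-- the two concrete strings compared by A and B contain q simultaneously
theorem pv_window_main (C q : List Char) (_hC : C ≠ []) (hq : q ≠ [])
    (k prN RN LsN : Nat) (hpr : prN ≤ C.length)
    (hLs : LsN = min (k * C.length + prN) (C.length + q.length - 1))
    (hR : LsN ≤ RN * C.length) :
    PySem.Chars.isIn q (pvRep k C ++ C.take prN)
      = PySem.Chars.isIn q ((pvRep RN C).take LsN) := by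
  set N := k + (RN + 1) with hN
  set M := k * C.length + prN with hM
  have hbig : pvRep k C ++ C.take prN = (pvRep N C).take M := by
    rw [hN, pvRep_add, hM, show k * C.length = (pvRep k C).length by rw [pvRep_len],
      List.take_length_add_append, pvRep_succ,
      List.take_append_of_le_length hpr]
  have hsmall : (pvRep RN C).take LsN = (pvRep N C).take LsN := by
    rw [show N = RN + (k + 1) by omega, pvRep_add,
      List.take_append_of_le_length (by rw [pvRep_len]; exact hR)]
  have hiff := pv_window C q hq N M LsN
    (by rw [hM, hN]; nlinarith [hpr]) hLs
  rw [hbig, hsmall]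
  rw [Bool.eq_iff_iff, PySem.Chars.isIn_iff_infix, PySem.Chars.isIn_iff_infix]
  exact hiff

theorem pvParseA_hash_run (hs : List Char) (hh : ∀ c ∈ hs, c = '#') (acc : List (List Char)) (t : List Char) :
    List.foldl (fun acc c =>
      if c = '#' then acc.dropLast ++ [acc.getLastD [] ++ ['#']]
      else acc ++ [[c]]) (acc ++ [t]) hs = acc ++ [t ++ hs] := by
  induction hs generalizing t with
  | nil => simp
  | cons c hs ih =>
    have hc : c = '#' := hh c (List.mem_cons_self)
    subst hc
    rw [List.foldl_cons, if_pos rfl, List.dropLast_concat, List.getLastD_concat,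
        ih (fun d hd => hh d (List.mem_cons_of_mem _ hd)) (t ++ ['#'])]
    simp

theorem pvParseA_eq_tokB_aux (cs : List Char) (h : cs.head? ≠ some '#') (acc : List (List Char)) :
    List.foldl (fun acc c =>
      if c = '#' then acc.dropLast ++ [acc.getLastD [] ++ ['#']]
      else acc ++ [[c]]) acc cs = acc ++ pvTokB cs := by
  match cs with
  | [] => simp [pvTokB]
  | c :: rest =>
    have hc : c ≠ '#' := by intro hc; exact h (by simp [hc])
    rw [pvTokB]
    simp only [List.foldl_cons, if_neg hc]
    conv_lhs => rw [← List.takeWhile_append_dropWhile (p := fun x => x = '#') (l := rest)]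
    rw [List.foldl_append]
    rw [pvParseA_hash_run (rest.takeWhile (· = '#'))
        (fun d hd => by simpa using List.mem_takeWhile_imp hd) acc [c]]
    have hdrop : (rest.dropWhile (· = '#')).head? ≠ some '#' := by
      intro hh
      have hne : rest.dropWhile (· = '#') ≠ [] := by intro h0; rw [h0] at hh; simp at hh
      have hnot := List.head_dropWhile_not (fun x => x = '#') hne
      rw [List.head?_eq_some_head hne, Option.some_inj] at hh
      rw [hh] at hnot; simp at hnot
    rw [pvParseA_eq_tokB_aux (rest.dropWhile (· = '#')) hdrop]
    simp
termination_by cs.length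
decreasing_by
  simp only [List.length_cons]
  exact Nat.lt_succ_of_le (List.length_dropWhile_le _ _)

theorem pvParseA_eq_tokB (cs : List Char) (h : cs.head? ≠ some '#') : pvParseA cs = pvTokB cs := by
  have := pvParseA_eq_tokB_aux cs h []
  simpa [pvParseA] using this

theorem pv_drop_head (rest : List Char) : (rest.dropWhile (· = '#')).head? ≠ some '#' := by
  intro hh
  have hne : rest.dropWhile (· = '#') ≠ [] := by intro h0; rw [h0] at hh; simp at hh
  have hnot := List.head_dropWhile_not (fun x => x = '#') hne
  rw [List.head?_eq_some_head hne, Option.some_inj] at hh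
  rw [hh] at hnot; simp at hnot

theorem pv_cycle (toks : List (List Char)) (n : Nat) (hL : 0 < toks.length) :
    (List.range n).map (fun k => (toks[(k % toks.length)]?).getD []) =
      (List.replicate (n / toks.length) toks).flatten ++ toks.take (n % toks.length) := by
  induction n with
  | zero => simp [Nat.zero_div, Nat.zero_mod]
  | succ n ih =>
    rw [List.range_succ, List.map_append, ih, List.map_singleton]
    have hmod : n % toks.length < toks.length := Nat.mod_lt _ hL
    have hget : toks[(n % toks.length)]? = some toks[n % toks.length] :=
      List.getElem?_eq_getElem hmod
    have hsplit : n + 1 = toks.length * (n / toks.length) + (n % toks.length + 1) := by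
      have := Nat.div_add_mod n toks.length; omega
    by_cases hc : n % toks.length + 1 < toks.length
    · have hd : (n + 1) / toks.length = n / toks.length := by
        rw [hsplit, Nat.mul_add_div hL]
        have : (n % toks.length + 1) / toks.length = 0 := Nat.div_eq_of_lt hc
        omega
      have hm : (n + 1) % toks.length = n % toks.length + 1 := by
        rw [hsplit, Nat.mul_add_mod]
        exact Nat.mod_eq_of_lt hc
      rw [hd, hm, List.take_add_one, hget]
      simp
    · have heq : n % toks.length + 1 = toks.length := by omega
      have hd : (n + 1) / toks.length = n / toks.length + 1 := by
        rw [hsplit, heq, Nat.mul_add_div hL, Nat.div_self hL]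
      have hm : (n + 1) % toks.length = 0 := by
        rw [hsplit, heq, Nat.mul_add_mod, Nat.mod_self]
      rw [hd, hm, List.replicate_succ', List.flatten_append]
      have htake : toks.take (n % toks.length) ++ [toks[n % toks.length]] = toks := by
        rw [show [toks[n % toks.length]] = toks[n % toks.length]?.toList by rw [hget]; rfl,
            ← List.take_add_one, heq, List.take_length]
      simp only [hget, Option.getD_some, List.take_zero, List.append_nil, List.flatten_cons,
        List.flatten_nil, List.append_nil, List.append_assoc, htake]

theorem pv_isIn_nil (q : List Char) (hq : q ≠ []) : PySem.Chars.isIn q [] = false := by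
  rw [PySem.Chars.isIn_eq_false_iff]
  simp [hq]

theorem pv_pyRange_nonpos (t : Int) (h : t ≤ 0) : PySem.List.pyRange 0 t 1 = [] := by
  simp [PySem.List.pyRange]
  intro h2
  omega

theorem pv_tokB_ne_nil (cs : List Char) (h : cs ≠ []) : pvTokB cs ≠ [] := by
  cases cs with
  | nil => exact absurd rfl h
  | cons c r => rw [pvTokB]; simp

-- A's minute-by-minute modulo loop, as repetitions plus a prefix
theorem pv_musicA (tks : List (List Char)) (n : Nat) (hL : 0 < tks.length) :
    (PySem.List.pyRange 0 (n : Int) 1).foldl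
      (fun acc i => acc ++ ((PySem.List.pyGet? tks (PySem.Int.mod i (tks.length : Int))).getD [] ++ [' '])) []
    = ((List.replicate (n / tks.length) tks).flatten ++ tks.take (n % tks.length)).flatMap
        (fun t => t ++ [' ']) := by
  rw [show PySem.List.pyRange 0 (n : Int) 1 = PySem.List.pyRange 0 (n : Int) from rfl,
    PySem.List.pyRange_zero_natCast, PySem.List.foldl_append_eq_flatMap, List.nil_append,
    List.flatMap_map]
  have hfun : ∀ k : Nat,
      (PySem.List.pyGet? tks (PySem.Int.mod (k : Int) (tks.length : Int))).getD [] ++ [' ']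
      = (fun t => t ++ [' ']) ((tks[(k % tks.length)]?).getD []) := by
    intro k
    rw [PySem.Int.mod_natCast, PySem.List.pyGet?_natCast]
  calc (List.range n).flatMap (fun (k : Nat) => (PySem.List.pyGet? tks (PySem.Int.mod (k : Int) (tks.length : Int))).getD [] ++ [' '])
      = (List.range n).flatMap (fun k => (fun t => t ++ [' ']) ((tks[(k % tks.length)]?).getD [])) := by
        rw [List.flatMap_def, List.flatMap_def]
        congr 1
        exact List.map_congr_left (fun k _ => hfun k)
    _ = ((List.range n).map (fun k => (tks[(k % tks.length)]?).getD [])).flatMap (fun t => t ++ [' ']) := by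
        rw [List.flatMap_map]
    _ = _ := by rw [pv_cycle tks n hL]

-- flatMap distributes over repeated cycles
theorem pv_flatMap_rep (f : List Char → List Char) (k : Nat) (ts : List (List Char)) :
    ((List.replicate k ts).flatten).flatMap f = pvRep k (ts.flatMap f) := by
  induction k with
  | zero => simp [pvRep]
  | succ k ih =>
    rw [List.replicate_succ, List.flatten_cons, List.flatMap_append, ih, pvRep_succ]

-- B's spacing pass emits each token followed by a space
theorem pvSpaced_token (tw : List Char) (htw : ∀ c ∈ tw, c = '#') (c : Char) (rest : List Char)
    (hr : rest.head? ≠ some '#') :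
    pvSpaced (c :: (tw ++ rest)) = (c :: tw) ++ ' ' :: pvSpaced rest := by
  induction tw generalizing c with
  | nil =>
    cases rest with
    | nil => simp [pvSpaced]
    | cons d r =>
      have : d ≠ '#' := by intro hd; exact hr (by simp [hd])
      simp [pvSpaced, this]
  | cons e tw ih =>
    have he : e = '#' := htw e List.mem_cons_self
    subst he
    rw [show (c :: (('#' :: tw) ++ rest)) = c :: ('#' :: (tw ++ rest)) by simp]
    rw [pvSpaced]
    simp only [List.head?_cons]
    rw [ih (fun d hd => htw d (List.mem_cons_of_mem _ hd)) '#']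
    simp

theorem pvSpaced_eq (cs : List Char) (h : cs.head? ≠ some '#') :
    pvSpaced cs = (pvTokB cs).flatMap (fun t => t ++ [' ']) := by
  match cs with
  | [] => simp [pvSpaced, pvTokB]
  | c :: rest =>
    rw [pvTokB, List.flatMap_cons]
    conv_lhs => rw [← List.takeWhile_append_dropWhile (p := fun x => x = '#') (l := rest)]
    rw [pvSpaced_token (rest.takeWhile (· = '#'))
        (fun d hd => by simpa using List.mem_takeWhile_imp hd) c _ (pv_drop_head rest)]
    rw [pvSpaced_eq (rest.dropWhile (· = '#')) (pv_drop_head rest)]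
    simp
termination_by cs.length
decreasing_by
  simp only [List.length_cons]
  exact Nat.lt_succ_of_le (List.length_dropWhile_le _ _)

-- the non-'#' count is the token count
theorem pv_count_eq_tokLen (cs : List Char) (h : cs.head? ≠ some '#') :
    cs.countP (fun ch => ch ≠ '#') = (pvTokB cs).length := by
  match cs with
  | [] => simp [pvTokB]
  | c :: rest =>
    have hc : c ≠ '#' := by intro hc; exact h (by simp [hc])
    rw [pvTokB]
    conv_lhs => rw [← List.takeWhile_append_dropWhile (p := fun x => x = '#') (l := rest)]
    rw [show (c :: (rest.takeWhile (· = '#') ++ rest.dropWhile (· = '#'))) =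
        (c :: rest.takeWhile (· = '#')) ++ rest.dropWhile (· = '#') by simp]
    rw [List.countP_append, pv_count_eq_tokLen (rest.dropWhile (· = '#')) (pv_drop_head rest)]
    have h0 : (rest.takeWhile (· = '#')).countP (fun ch => decide (ch ≠ '#')) = 0 := by
      rw [List.countP_eq_zero]
      intro a ha
      simpa using List.mem_takeWhile_imp ha
    rw [List.countP_cons, h0]
    simp only [hc, ne_eq, not_false_iff, decide_true, if_pos]
    simp [List.length_cons]
    omega
termination_by cs.length
decreasing_by
  simp only [List.length_cons]
  exact Nat.lt_succ_of_le (List.length_dropWhile_le _ _)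

-- B's pr loop skips '#'s without counting
theorem pvPrLoop_hash (tw : List Char) (htw : ∀ c ∈ tw, c = '#') (rest : List Char)
    (j cnt r dflt : Int) :
    pvPrLoop (tw ++ rest) j cnt r dflt = pvPrLoop rest (j + tw.length) cnt r dflt := by
  induction tw generalizing j with
  | nil => simp
  | cons e tw ih =>
    have he : e = '#' := htw e List.mem_cons_self
    subst he
    rw [List.cons_append, pvPrLoop, if_neg (by simp)]
    rw [ih (fun d hd => htw d (List.mem_cons_of_mem _ hd)) (j + 1)]
    congr 1
    simp only [List.length_cons]
    push_cast
    ring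

-- B's pr loop computes the spaced length of the first r tokens
theorem pvPr_aux (cs : List Char) (h : cs.head? ≠ some '#') (r : Nat)
    (hr : r < (pvTokB cs).length) (j cnt dflt : Int) :
    pvPrLoop cs j cnt (cnt + (r : Int)) dflt
      = j + cnt + ((((pvTokB cs).take r).flatMap (fun t => t ++ [' '])).length : Int) := by
  match cs with
  | [] => rw [pvTokB] at hr; simp at hr
  | c :: rest =>
    have hc : c ≠ '#' := by intro hc; exact h (by simp [hc])
    rw [pvTokB] at hr ⊢
    match r with
    | 0 =>
      rw [pvPrLoop, if_pos hc, if_pos (by push_cast; ring)]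
      simp
    | (s+1) =>
      rw [pvPrLoop, if_pos hc, if_neg (by push_cast; omega)]
      conv_lhs => rw [← List.takeWhile_append_dropWhile (p := fun x => x = '#') (l := rest)]
      rw [pvPrLoop_hash (rest.takeWhile (· = '#'))
          (fun d hd => by simpa using List.mem_takeWhile_imp hd)]
      rw [show cnt + ((s + 1 : Nat) : Int) = (cnt + 1) + (s : Int) by push_cast; ring]
      rw [pvPr_aux (rest.dropWhile (· = '#')) (pv_drop_head rest) s (by simpa using hr)]
      simp only [List.take_succ_cons, List.flatMap_cons, List.length_append, List.length_cons,
        List.length_nil]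
      push_cast
      ring
termination_by cs.length
decreasing_by
  simp only [List.length_cons]
  exact Nat.lt_succ_of_le (List.length_dropWhile_le _ _)

-- the query strings agree
theorem pv_join_flat (t : List Char) (ts : List (List Char)) :
    PySem.Chars.join [' '] (t :: ts) ++ [' '] = (t :: ts).flatMap (fun x => x ++ [' ']) := by
  rw [show PySem.Chars.join = fun (sep : List Char) parts => List.intercalate sep parts from rfl]
  dsimp only []
  induction ts generalizing t with
  | nil => simp [List.intercalate]
  | cons u ts' ih =>
    have h2 : List.intercalate [' '] (t :: u :: ts')
        = t ++ ([' '] ++ List.intercalate [' '] (u :: ts')) := by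
      simp [List.intercalate, List.intersperse]
    rw [h2, List.flatMap_cons, ← ih u]
    simp

theorem pv_q_eq (cs : List Char) (h : cs.head? ≠ some '#') :
    PySem.Chars.join [' '] (pvTokB cs) ++ [' ']
      = (if cs ≠ [] then pvSpaced cs else [' ']) := by
  cases cs with
  | nil => simp [pvTokB, PySem.Chars.join, List.intercalate]
  | cons c rest =>
    rw [if_pos (by simp), pvSpaced_eq _ h, pvTokB, pv_join_flat, ← pvTokB]

-- the per-music steps agree
set_option maxHeartbeats 1600000 in
theorem pvStepAB (q : List Char) (hq : q ≠ []) (info : List Char)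
    (hm : ((PySem.Chars.splitOn info [',']).getD 3 []).head? ≠ some '#')
    (hz : (PySem.Chars.splitOn info [',']).getD 3 [] = [] →
      ((PySem.Int.ofChars? (PySem.List.slice ((PySem.Chars.splitOn info [',']).getD 1 []) none (some 2))).getD 0
       - (PySem.Int.ofChars? (PySem.List.slice ((PySem.Chars.splitOn info [',']).getD 0 []) none (some 2))).getD 0) * 60
      + ((PySem.Int.ofChars? (PySem.List.slice ((PySem.Chars.splitOn info [',']).getD 1 []) (some 3) none)).getD 0
       - (PySem.Int.ofChars? (PySem.List.slice ((PySem.Chars.splitOn info [',']).getD 0 []) (some 3) none)).getD 0) ≤ 0)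
    (st : String × Int) :
    pvStepA q st info = pvStepB q st info := by
  unfold pvStepA pvStepB
  dsimp only []
  rw [pvParseA_eq_tokB _ hm]
  set parts := PySem.Chars.splitOn info [','] with hparts
  set T := ((PySem.Int.ofChars? (PySem.List.slice (parts.getD 1 []) none (some 2))).getD 0
          - (PySem.Int.ofChars? (PySem.List.slice (parts.getD 0 []) none (some 2))).getD 0) * 60
         + ((PySem.Int.ofChars? (PySem.List.slice (parts.getD 1 []) (some 3) none)).getD 0
          - (PySem.Int.ofChars? (PySem.List.slice (parts.getD 0 []) (some 3) none)).getD 0) with hT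
  set mel := parts.getD 3 [] with hmel
  set toks := pvTokB mel with htoks
  by_cases hpos : 0 < T
  · -- positive playing time: mel is a nonempty melody not starting with '#'
    have hmelne : mel ≠ [] := fun h0 => absurd hpos (by have := hz h0; omega)
    obtain ⟨c0, mrest, hmc⟩ : ∃ c0 mrest, mel = c0 :: mrest := by
      cases hme : mel with
      | nil => exact absurd hme hmelne
      | cons a b => exact ⟨a, b, rfl⟩
    have hc0 : c0 ≠ '#' := by intro hcc; rw [hmc, hcc] at hm; simp at hm
    have hcnt : mel.countP (fun ch => ch ≠ '#') = toks.length := pv_count_eq_tokLen mel hm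
    have hL : 0 < toks.length := by
      rw [← hcnt]
      exact List.countP_pos_iff.mpr ⟨c0, by rw [hmc]; exact List.mem_cons_self, by simp [hc0]⟩
    have hn0 : ¬((mel.countP (fun ch => ch ≠ '#') : Int) = 0) := by
      rw [hcnt]; omega
    have hcond : ¬(T ≤ 0 ∨ (mel.countP (fun ch => ch ≠ '#') : Int) = 0) := by
      rintro (h | h)
      · omega
      · exact hn0 h
    conv_rhs => rw [if_neg hcond]
    -- name the Nat versions of time, cycle count and remainder
    set Tn := T.toNat with hTnd
    have hTn : T = (Tn : Int) := (Int.toNat_of_nonneg (by omega)).symm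
    set L := toks.length with hLd
    set kn := Tn / L with hknd
    set rn := Tn % L with hrnd
    have hrnL : rn < L := Nat.mod_lt _ hL
    -- the spaced cycle
    set C := toks.flatMap (fun t => t ++ [' ']) with hCd
    have hCspaced : pvSpaced mel = C := pvSpaced_eq mel hm
    have hCne : C ≠ [] := by
      have := pv_tokB_ne_nil mel hmelne
      rw [hCd]
      cases hte : toks with
      | nil => exact absurd hte (by rw [← htoks] at *; exact this)
      | cons t ts => simp
    have hClen : 0 < C.length := List.length_pos_iff.mpr hCne
    -- the partial cycle is a prefix of C
    set prN := ((toks.take rn).flatMap (fun t => t ++ [' '])).length with hprNd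
    have hCsplit : C = (toks.take rn).flatMap (fun t => t ++ [' '])
        ++ (toks.drop rn).flatMap (fun t => t ++ [' ']) := by
      rw [hCd, ← List.flatMap_append, List.take_append_drop]
    have htakepr : C.take prN = (toks.take rn).flatMap (fun t => t ++ [' ']) := by
      rw [hCsplit, hprNd, List.take_left]
    have hprle : prN ≤ C.length := by
      rw [hCsplit, List.length_append, hprNd]; omega
    -- A's music string
    rw [hTn]
    conv_lhs => rw [pv_musicA toks Tn hL]
    rw [List.flatMap_append, pv_flatMap_rep, ← hCd, ← hknd, ← hrnd, ← htakepr]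
    -- B's arithmetic
    rw [hcnt, PySem.Int.floordiv_natCast, PySem.Int.mod_natCast, ← hknd, ← hrnd, hCspaced]
    have hprloop : ∀ dflt, pvPrLoop mel 0 0 ((rn : Nat) : Int) dflt = (prN : Int) := by
      intro dflt
      have := pvPr_aux mel hm rn (by rw [← hLd]; exact hrnL) 0 0 dflt
      rw [show (0 : Int) + (rn : Int) = ((rn : Nat) : Int) by ring] at this
      rw [this, ← hprNd]
      ring
    rw [hprloop]
    -- B's window length and repetition count, as naturals
    have hq1 : 1 ≤ q.length := List.length_pos_iff.mpr hq
    set MN := kn * C.length + prN with hMNd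
    have hMcast : (kn : Int) * (C.length : Int) + (prN : Int) = (MN : Int) := by
      rw [hMNd]; push_cast; ring
    rw [hMcast]
    set LsN := min MN (C.length + q.length - 1) with hLsNd
    have hLscast : min ((MN : Nat) : Int) ((C.length : Int) + (q.length : Int) - 1) = (LsN : Int) := by
      rw [hLsNd, Nat.cast_min]
      congr 1
      omega
    rw [hLscast]
    set R := -(PySem.Int.floordiv (-(LsN : Int)) (C.length : Int)) with hRd
    have hbr : ((R - 1) * (C.length : Int) < (LsN : Int) ∧ (LsN : Int) ≤ R * (C.length : Int)) :=
      (PySem.Int.neg_floordiv_neg_eq_iff_of_pos (a := (LsN : Int)) (b := (C.length : Int))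
        (by exact_mod_cast hClen)).mp rfl
    have hR0 : 0 ≤ R := by nlinarith [hbr.1, hbr.2, Int.natCast_nonneg LsN]
    have hRle : LsN ≤ R.toNat * C.length := by
      have h1 : (LsN : Int) ≤ (R.toNat : Int) * (C.length : Int) := by
        rw [Int.toNat_of_nonneg hR0]; exact hbr.2
      exact_mod_cast h1
    -- B's small string is the LsN-window of the repeated cycle
    have hsmall : PySem.List.slice (PySem.List.pyRepeat C R) none (some (LsN : Int))
        = (pvRep R.toNat C).take LsN := by
      rw [PySem.List.slice_to _ (Int.natCast_nonneg LsN), Int.toNat_natCast]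
      rfl
    rw [hsmall]
    -- the two containment tests agree
    rw [pv_window_main C q hCne hq kn prN R.toNat LsN hprle (by rw [hLsNd, hMNd]) hRle]
  · -- non-positive playing time: A's music is empty, B skips
    rw [if_pos (Or.inl (by omega))]
    rw [pv_pyRange_nonpos T (by omega)]
    simp [pv_isIn_nil q hq]

-- ===== VERDICT (by name: the statement is the Claim_ definition above) =====
set_option maxHeartbeats 1600000 in
theorem solution_spec : Claim_equal_solution := by
  unfold Claim_equal_solution
  intro m infos hdom hpre
  unfold Spec_solution solution solution_alt
  dsimp only []
  obtain ⟨hm0, hinfos⟩ := hpre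
  rw [pvParseA_eq_tokB m.toList hm0, pv_q_eq m.toList hm0]
  set q := (if m.toList ≠ [] then pvSpaced m.toList else [' ']) with hqd
  have hq : q ≠ [] := by
    rw [hqd, ← pv_q_eq m.toList hm0]
    simp
  rw [PySem.List.foldl_congr_mem infos (fun st info => pvStepA q st info.toList)
      (fun st info => pvStepB q st info.toList) ("(None)", 0)
      (fun st info hmem =>
        pvStepAB q hq info.toList
          ((hinfos info hmem).2.2.2.2.2.1) ((hinfos info hmem).2.2.2.2.2.2) st)]
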